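-- pv_equiv track=rewrite | github.com/qe-team/marmot | marmot/util/ngram_window_extractor.py | left_context
-- ===== SOURCE A (Python) =====
-- def locate_token(token, sentence):
--     try:
--         i = sentence.index(token)
--         return i
--     except ValueError:
--         return -1
--
-- def left_context(token_list, token, context_size=1, idx=None):
--     index = idx or locate_token(token, token_list)
--     left_window = []
--     if index != -1:
--         for i in range(index-context_size, index):
--             if i < 0:
-- #                left_window.append('_START_')
--                 left_window.append('<s>')
--             else:
--                 left_window.append(token_list[i])
--     return left_window
-- ===== SOURCE B (Python) =====
-- def locate_token(token, sentence):
--     try: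
--         i = sentence.index(token)
--         return i
--     except ValueError:
--         return -1
--
-- def left_context(token_list, token, context_size=1, idx=None):
--     index = idx or locate_token(token, token_list)
--     if index == -1:
--         return []
--     pad = max(0, context_size - index)
--     return ['<s>'] * pad + token_list[max(0, index - context_size):index]
-- ===== Notes on version B (the rewrite author's own statement) =====
-- stated objective: simpler
-- what changed: Replaces the per-index loop with its per-element sign branch by a closed-form count of '<s>' padding markers plus one list slice; Pre_ restricts a truthy idx to the function's natural domain (the -1 sentinel or a position 0..len, with larger positions admitted only when context_size < 1, where the window is empty): a negative position is malformed input no caller passes, and a position past the list makes A raise IndexError when context_size >= 1.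
-- outside the precondition, e.g. on left_context(['a', 'b'], 'x', 1, -2): A returns ['<s>'], B returns ['<s>', '<s>', '<s>']; on left_context(['a', 'b'], 'a', 1, 5): A raises IndexError, B returns []
import Mathlib
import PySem

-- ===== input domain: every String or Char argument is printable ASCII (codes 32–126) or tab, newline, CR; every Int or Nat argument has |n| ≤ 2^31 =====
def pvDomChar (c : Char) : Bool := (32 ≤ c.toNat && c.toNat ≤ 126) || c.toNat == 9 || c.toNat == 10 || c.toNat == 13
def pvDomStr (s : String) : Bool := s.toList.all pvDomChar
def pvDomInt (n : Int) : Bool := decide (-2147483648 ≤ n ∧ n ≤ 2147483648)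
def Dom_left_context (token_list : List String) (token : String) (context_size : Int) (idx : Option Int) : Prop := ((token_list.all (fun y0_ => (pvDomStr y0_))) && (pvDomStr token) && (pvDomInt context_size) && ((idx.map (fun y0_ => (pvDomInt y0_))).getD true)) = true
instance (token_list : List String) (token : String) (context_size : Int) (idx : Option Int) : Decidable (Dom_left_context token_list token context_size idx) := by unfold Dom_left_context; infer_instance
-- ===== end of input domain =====

-- B replaces A's per-index loop by a closed-form padding count plus one slice (objective: simpler).
-- ===== PORT A =====
-- shared module helper: sentence.index(token) with ValueError -> -1
def locate_token (token : String) (sentence : List String) : Int :=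
  match PySem.List.index? sentence token with
  | some i => (i : Int)
  | none => -1

-- the Python line 'index = idx or locate_token(token, token_list)' (0 and None are falsy)
def pyIndexOr (idx : Option Int) (token : String) (token_list : List String) : Int :=
  match idx with
  | none => locate_token token token_list
  | some n => if n = 0 then locate_token token token_list else n

def left_context (token_list : List String) (token : String) (context_size : Int) (idx : Option Int) : List String :=
  let index := pyIndexOr idx token token_list
  if index ≠ -1 then
    (PySem.List.pyRange (index - context_size) index 1).foldl
      (fun left_window i =>
        if i < 0 then left_window ++ ["<s>"]
        else left_window ++ [PySem.List.pyGetD token_list i ""])  -- token_list[i]; Pre_ keeps i in range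
      []
  else []

-- ===== PORT B =====
def left_context_alt (token_list : List String) (token : String) (context_size : Int) (idx : Option Int) : List String :=
  let index := pyIndexOr idx token token_list
  if index = -1 then []
  else
    let pad := max 0 (context_size - index)
    List.replicate pad.toNat "<s>" ++
      PySem.List.slice token_list (some (max 0 (index - context_size))) (some index)

-- ===== PRECONDITION & SPEC =====
-- Pre_ restricts a truthy idx to the function's natural domain: the -1 sentinel or a position 0..len
-- (a position past the list is admitted only when context_size < 1, where the window is empty); a
-- negative position is malformed input no caller passes, and a position past the list makes A's loop
-- raise IndexError when context_size ≥ 1.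
def Pre_left_context (token_list : List String) (token : String) (context_size : Int) (idx : Option Int) : Prop :=
  idx.getD 0 = 0 ∨ idx.getD 0 = -1 ∨
    (0 ≤ idx.getD 0 ∧ (idx.getD 0 ≤ (token_list.length : Int) ∨ context_size < 1))
instance (token_list : List String) (token : String) (context_size : Int) (idx : Option Int) : Decidable (Pre_left_context token_list token context_size idx) := by unfold Pre_left_context; infer_instance

def pvWitness_left_context : List String × String × Int × Option Int := (["a", "b"], "a", 1, none)

def Spec_left_context (token_list : List String) (token : String) (context_size : Int) (idx : Option Int) (out : List String) : Prop := out = left_context_alt token_list token context_size idx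
instance (token_list : List String) (token : String) (context_size : Int) (idx : Option Int) (out : List String) : Decidable (Spec_left_context token_list token context_size idx out) := by unfold Spec_left_context; infer_instance

-- ===== CLAIM =====
def Claim_equal_left_context : Prop := ∀ (token_list : List String) (token : String) (context_size : Int) (idx : Option Int), Dom_left_context token_list token context_size idx → Pre_left_context token_list token context_size idx → Spec_left_context token_list token context_size idx (left_context token_list token context_size idx)

-- ===== LEMMAS AND PROOFS =====

-- the loop body is an append of a single conditional element
lemma foldl_if_push (tl : List String) (l : List Int) (acc : List String) :
    l.foldl (fun left_window i =>
        if i < 0 then left_window ++ ["<s>"]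
        else left_window ++ [PySem.List.pyGetD tl i ""]) acc
      = acc ++ l.map (fun i => if i < 0 then "<s>" else PySem.List.pyGetD tl i "") := by
  have h : (fun (left_window : List String) (i : Int) =>
        if i < 0 then left_window ++ ["<s>"]
        else left_window ++ [PySem.List.pyGetD tl i ""])
      = fun left_window i => left_window ++ [if i < 0 then "<s>" else PySem.List.pyGetD tl i ""] := by
    funext a i; split <;> rfl
  rw [h, PySem.List.foldl_append_singleton_eq_map]

-- all-negative range: only '<s>' markers
lemma map_range_neg (tl : List String) (lo hi : Int) (h : hi ≤ 0) :
    (PySem.List.pyRange lo hi 1).map (fun i => if i < 0 then "<s>" else PySem.List.pyGetD tl i "")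
      = List.replicate (hi - lo).toNat "<s>" := by
  rw [PySem.List.pyRange_one, List.map_map]
  rw [List.map_congr_left (fun k hk => ?_), List.map_const', List.length_range]
  have hk' := List.mem_range.mp hk
  simp only [Function.comp_apply]
  rw [if_pos (by omega)]

-- all-nonnegative range within the list: the slice
lemma map_range_nonneg (tl : List String) (lo hi : Int) (h0 : 0 ≤ lo) (h1 : 0 ≤ hi)
    (hlen : hi ≤ (tl.length : Int)) :
    (PySem.List.pyRange lo hi 1).map (fun i => if i < 0 then "<s>" else PySem.List.pyGetD tl i "")
      = PySem.List.slice tl (some lo) (some hi) := by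
  rw [PySem.List.slice_toNat tl h0 h1, PySem.List.pyRange_one, List.map_map]
  apply List.ext_getElem
  · simp only [List.length_map, List.length_range, List.length_take, List.length_drop]
    omega
  · intro k hk1 hk2
    simp only [List.length_map, List.length_range] at hk1
    simp only [List.getElem_map, List.getElem_range, Function.comp_apply,
      List.getElem_take, List.getElem_drop]
    rw [if_neg (by omega), PySem.List.pyGetD_eq_getElem tl "" (by omega) (by omega)]
    congr 1
    omega

-- the loop equals padding-plus-slice: nonnegative end, loop in range when nonempty
lemma window_eq (tl : List String) (lo hi : Int) (hhi : 0 ≤ hi)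
    (hok : 1 ≤ hi - lo → hi ≤ (tl.length : Int)) :
    (PySem.List.pyRange lo hi 1).foldl
      (fun left_window i =>
        if i < 0 then left_window ++ ["<s>"]
        else left_window ++ [PySem.List.pyGetD tl i ""]) []
      = List.replicate (max 0 (-lo)).toNat "<s>" ++
          PySem.List.slice tl (some (max 0 lo)) (some hi) := by
  rw [foldl_if_push, List.nil_append]
  by_cases hle : hi ≤ lo
  · -- empty window
    rw [PySem.List.pyRange_one_eq_nil hle, List.map_nil]
    have hpad : (max 0 (-lo)).toNat = 0 := by omega
    rw [hpad, List.replicate_zero, List.nil_append,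
      PySem.List.slice_toNat tl (by omega) (by omega)]
    have : hi.toNat - (max 0 lo).toNat = 0 := by omega
    rw [this, List.take_zero]
  · have hlen : hi ≤ (tl.length : Int) := hok (by omega)
    by_cases hlo : 0 ≤ lo
    · -- no padding
      rw [map_range_nonneg tl lo hi hlo (by omega) hlen]
      have hpad : (max 0 (-lo)).toNat = 0 := by omega
      rw [hpad, List.replicate_zero, List.nil_append, show max 0 lo = lo from by omega]
    · -- split the range at 0
      rw [PySem.List.pyRange_one_append lo 0 hi (by omega) (by omega), List.map_append,
        map_range_neg tl lo 0 le_rfl, map_range_nonneg tl 0 hi le_rfl (by omega) hlen,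
        show max 0 (-lo) = 0 - lo from by omega, show max 0 lo = 0 from by omega]

-- locate_token returns -1 or a valid position
lemma locate_token_cases (token : String) (sentence : List String) :
    locate_token token sentence = -1 ∨
      (0 ≤ locate_token token sentence ∧ locate_token token sentence ≤ (sentence.length : Int)) := by
  unfold locate_token
  cases h : PySem.List.index? sentence token with
  | none => exact Or.inl rfl
  | some k =>
    obtain ⟨hk, -, -⟩ := PySem.List.getElem_of_index?_eq_some h
    right
    constructor <;> simp <;> omega

-- ===== VERDICT =====
theorem left_context_spec : Claim_equal_left_context := by
  intro token_list token context_size idx _hDom hPre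
  unfold Spec_left_context left_context left_context_alt
  set index := pyIndexOr idx token token_list with hidx
  by_cases h : index = -1
  · simp [h]
  · rw [if_pos h, if_neg h]
    -- under Pre_, the effective index is a valid position 0..len (or the loop is empty past len)
    have hbound : 0 ≤ index ∧ (1 ≤ index - (index - context_size) → index ≤ (token_list.length : Int)) := by
      unfold Pre_left_context at hPre
      have hcases : index = -1 ∨ (0 ≤ index ∧ index ≤ (token_list.length : Int)) ∨
          (0 ≤ index ∧ context_size < 1) := by
        rw [hidx]; unfold pyIndexOr
        cases idx with
        | none => exact (locate_token_cases token token_list).imp id (fun h => Or.inl h)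
        | some n =>
          simp only [Option.getD_some] at hPre
          by_cases hn : n = 0
          · simp only [if_pos hn]
            exact (locate_token_cases token token_list).imp id (fun h => Or.inl h)
          · simp only [if_neg hn]
            rcases hPre with h0 | h1 | ⟨h2, h3 | h4⟩
            · exact absurd h0 hn
            · exact Or.inl h1
            · exact Or.inr (Or.inl ⟨h2, h3⟩)
            · exact Or.inr (Or.inr ⟨h2, h4⟩)
      rcases hcases with hc | ⟨hc1, hc2⟩ | ⟨hc1, hc2⟩
      · exact absurd hc h
      · exact ⟨hc1, fun _ => hc2⟩
      · exact ⟨hc1, fun hw => by omega⟩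
    obtain ⟨h0, hok⟩ := hbound
    rw [window_eq token_list (index - context_size) index h0 hok,
      show max 0 (-(index - context_size)) = max 0 (context_size - index) from by omega]
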